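-- pv_equiv track=rewrite | github.com/shreyashi2609/AIGuessMaster | backend/game_logic.py | is_guess_reasonable
-- ===== SOURCE A (Python) =====
-- def is_guess_reasonable(guess, previous_guesses, secret_number):
--     """
--     Check if a guess is reasonable based on previous feedback
--
--     Args:
--         guess (int): The current guess
--         previous_guesses (list): List of previous guesses
--         secret_number (int): The secret number
--
--     Returns:
--         bool: True if the guess is reasonable
--     """
--     if not previous_guesses:
--         return True
--
--     # Check if the guess is within the range suggested by previous guesses
--     for prev_guess in previous_guesses:
--         if prev_guess < secret_number and guess <= prev_guess:
--             return False  # Should guess higher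
--         elif prev_guess > secret_number and guess >= prev_guess:
--             return False  # Should guess lower
--
--     return True
-- ===== SOURCE B (Python) =====
-- def is_guess_reasonable(guess, previous_guesses, secret_number):
--     lows = [p for p in previous_guesses if p < secret_number]
--     highs = [p for p in previous_guesses if p > secret_number]
--     return (not lows or max(lows) < guess) and (not highs or guess < min(highs))
-- ===== Notes on version B (the rewrite author's own statement) =====
-- stated objective: simpler
-- what changed: Replaces the early-return scan over all previous guesses by a bound computation: max of guesses below the secret and min of guesses above it, then a single interval check lower < guess < upper.
import Mathlib
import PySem

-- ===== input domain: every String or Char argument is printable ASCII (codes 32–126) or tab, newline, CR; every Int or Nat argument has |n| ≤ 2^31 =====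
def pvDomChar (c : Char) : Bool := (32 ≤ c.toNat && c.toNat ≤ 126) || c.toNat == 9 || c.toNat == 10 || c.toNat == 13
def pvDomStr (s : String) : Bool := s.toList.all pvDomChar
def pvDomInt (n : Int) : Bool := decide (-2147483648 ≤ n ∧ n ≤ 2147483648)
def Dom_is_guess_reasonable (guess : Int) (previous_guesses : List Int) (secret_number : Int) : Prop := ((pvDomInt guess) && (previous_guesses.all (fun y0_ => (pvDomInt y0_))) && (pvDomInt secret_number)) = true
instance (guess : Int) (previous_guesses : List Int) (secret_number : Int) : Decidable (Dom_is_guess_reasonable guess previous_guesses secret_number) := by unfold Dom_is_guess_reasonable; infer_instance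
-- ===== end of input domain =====

-- B replaces A's early-return scan by a bound computation (max of guesses below the secret, min of guesses above), then a single interval check; objective: simpler.


-- ===== PORT A =====
-- the for-loop with early returns, as structural recursion
def isGRLoop (guess secret : Int) : List Int → Bool
  | [] => true
  | p :: rest =>
    if p < secret && guess ≤ p then false
    else if p > secret && guess ≥ p then false
    else isGRLoop guess secret rest

def is_guess_reasonable (guess : Int) (previous_guesses : List Int) (secret_number : Int) : Bool :=
  if previous_guesses.isEmpty then true
  else isGRLoop guess secret_number previous_guesses

-- ===== PORT B =====
def is_guess_reasonable_alt (guess : Int) (previous_guesses : List Int) (secret_number : Int) : Bool :=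
  let lows := previous_guesses.filter (fun p => p < secret_number)
  let highs := previous_guesses.filter (fun p => p > secret_number)
  (match PySem.List.max? lows (fun x => x) with
   | none => true
   | some m => decide (m < guess)) &&
  (match PySem.List.min? highs (fun x => x) with
   | none => true
   | some m => decide (guess < m))

-- ===== PRECONDITION & SPEC =====
def Spec_is_guess_reasonable (guess : Int) (previous_guesses : List Int) (secret_number : Int) (out : Bool) : Prop := out = is_guess_reasonable_alt guess previous_guesses secret_number
instance (guess : Int) (previous_guesses : List Int) (secret_number : Int) (out : Bool) : Decidable (Spec_is_guess_reasonable guess previous_guesses secret_number out) := by unfold Spec_is_guess_reasonable; infer_instance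

-- ===== CLAIM (what is proved, stated in full; the proofs are below) =====
def Claim_equal_is_guess_reasonable : Prop := ∀ (guess : Int) (previous_guesses : List Int) (secret_number : Int), Dom_is_guess_reasonable guess previous_guesses secret_number → Spec_is_guess_reasonable guess previous_guesses secret_number (is_guess_reasonable guess previous_guesses secret_number)

-- ===== LEMMAS AND PROOFS =====
lemma isGRLoop_eq_all (g s : Int) (l : List Int) :
    isGRLoop g s l =
      l.all (fun p => !(decide (p < s) && decide (g ≤ p)) && !(decide (p > s) && decide (g ≥ p))) := by
  induction l with
  | nil => rfl
  | cons p rest ih =>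
    simp only [isGRLoop, List.all_cons, ih]
    cases hc1 : (decide (p < s) && decide (g ≤ p)) <;>
      cases hc2 : (decide (p > s) && decide (g ≥ p)) <;> simp_all

lemma max_guard_eq_all (g : Int) (l : List Int) :
    (match PySem.List.max? l (fun x => x) with
     | none => true
     | some m => decide (m < g)) = l.all (fun p => decide (p < g)) := by
  cases h : PySem.List.max? l (fun x => x) with
  | none =>
    have : l = [] := (PySem.List.max?_eq_none_iff _ _).1 h
    simp [this]
  | some m =>
    have hmem : m ∈ l := PySem.List.max?_mem h
    have hmax : ∀ y ∈ l, (fun x => x) y ≤ (fun x => x) m := PySem.List.max?_isMax h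
    rw [Bool.eq_iff_iff]
    simp only [decide_eq_true_eq, List.all_eq_true]
    constructor
    · intro hm y hy; exact lt_of_le_of_lt (hmax y hy) hm
    · intro h'; exact h' m hmem

lemma min_guard_eq_all (g : Int) (l : List Int) :
    (match PySem.List.min? l (fun x => x) with
     | none => true
     | some m => decide (g < m)) = l.all (fun p => decide (g < p)) := by
  cases h : PySem.List.min? l (fun x => x) with
  | none =>
    have : l = [] := (PySem.List.min?_eq_none_iff _ _).1 h
    simp [this]
  | some m =>
    have hmem : m ∈ l := PySem.List.min?_mem h
    have hmin : ∀ y ∈ l, (fun x => x) m ≤ (fun x => x) y := PySem.List.min?_isMin h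
    rw [Bool.eq_iff_iff]
    simp only [decide_eq_true_eq, List.all_eq_true]
    constructor
    · intro hm y hy; exact lt_of_lt_of_le hm (hmin y hy)
    · intro h'; exact h' m hmem

-- ===== VERDICT (by name: the statement is the Claim_ definition above) =====
theorem is_guess_reasonable_spec : Claim_equal_is_guess_reasonable := by
  intro g prev s _
  unfold Spec_is_guess_reasonable is_guess_reasonable is_guess_reasonable_alt
  dsimp only
  rw [max_guard_eq_all, min_guard_eq_all]
  cases hp : prev.isEmpty
  · simp only [Bool.false_eq_true, if_false, isGRLoop_eq_all]
    rw [Bool.eq_iff_iff]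
    simp only [Bool.and_eq_true, List.all_eq_true, List.mem_filter, decide_eq_true_eq,
      Bool.not_eq_eq_eq_not, Bool.not_true, Bool.and_eq_false_iff, decide_eq_false_iff_not,
      not_lt, not_le, ge_iff_le]
    constructor
    · intro h
      refine ⟨fun p hp' => ?_, fun p hp' => ?_⟩
      · rcases h p hp'.1 with ⟨h1, _⟩; rcases h1 with h1 | h1 <;> omega
      · rcases h p hp'.1 with ⟨_, h2⟩; rcases h2 with h2 | h2 <;> omega
    · rintro ⟨h1, h2⟩ p hp'
      by_cases hps : p < s
      · have := h1 p ⟨hp', hps⟩; exact ⟨Or.inr (by omega), Or.inl (by omega)⟩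
      · by_cases hsp : p > s
        · have := h2 p ⟨hp', hsp⟩; exact ⟨Or.inl (by omega), Or.inr (by omega)⟩
        · exact ⟨Or.inl (by omega), Or.inl (by omega)⟩
  · have : prev = [] := List.isEmpty_iff.1 hp
    simp [this]
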